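-- pv_equiv track=rewrite | github.com/HOZH/leetCode | leetCodePython2020/1399.count-largest-group.py | countLargestGroup
-- ===== SOURCE A (Python) =====
-- from collections import defaultdict
--
-- def countLargestGroup(n: int) -> int:
--
--     temp_dict = defaultdict(list)
--     for i in range(1, n+1):
--         current = str(i)
--         current_val = 0
--         for j in current:
--             current_val += int(j)
--
--         temp_dict[current_val].append(i)
--
--     bag = list(temp_dict.values())
--
--     bag.sort(key=lambda x: len(x), reverse=True)
--
--     max_len = len(bag[0])
--
--     ans = 0
--
--     for i in bag:
--         if len(i) == max_len:
--             ans += 1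
--         else:
--             break
--     return ans
-- ===== SOURCE B (Python) =====
-- def countLargestGroup(n: int) -> int:
--     counts = {}
--     for i in range(1, n + 1):
--         s = 0
--         for c in str(i):
--             s += int(c)
--         counts[s] = counts.get(s, 0) + 1
--     m = max(counts.values())
--     return sum(1 for v in counts.values() if v == m)
-- ===== Notes on version B (the rewrite author's own statement) =====
-- stated objective: simpler
-- what changed: B accumulates a digit_sum -> count dictionary directly instead of grouping indices into lists, and replaces A's sort-by-length-descending plus prefix-scan-with-break by max(counts.values()) and a single count of values equal to that maximum.
import Mathlib
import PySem

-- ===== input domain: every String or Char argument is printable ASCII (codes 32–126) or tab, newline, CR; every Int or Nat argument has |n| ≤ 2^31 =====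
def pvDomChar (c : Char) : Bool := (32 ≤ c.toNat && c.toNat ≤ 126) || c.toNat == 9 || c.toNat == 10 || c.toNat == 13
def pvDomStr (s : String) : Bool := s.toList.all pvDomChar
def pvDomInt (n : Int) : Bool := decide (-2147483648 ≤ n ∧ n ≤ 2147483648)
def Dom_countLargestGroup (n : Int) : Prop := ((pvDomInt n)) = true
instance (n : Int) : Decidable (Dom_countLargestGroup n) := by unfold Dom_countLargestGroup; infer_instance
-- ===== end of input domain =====

-- B replaces A's group-lists + sort-descending + prefix-scan-with-break by a digit-sum -> count
-- dictionary, max of its values and one counting pass (objective: simpler).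

-- ===== PORT A =====
-- digit sum of i via str(i): both Pythons contain this identical two-line loop.
-- int(j) is PySem.Int.ofChars? [j]; for positive i every char of str(i) is a digit, so the `.getD` default is unreachable.
def pvDigitSum (i : Int) : Int :=
  (PySem.Int.toChars i).foldl (fun a j => a + ((PySem.Int.ofChars? [j]).getD 0)) 0

-- A's final loop: 'for i in bag: if len(i) == max_len: ans += 1 else: break'
def pvScanBreak (maxLen : Int) : List (List Int) → Int → Int
  | [], ans => ans
  | i :: rest, ans =>
      if (i.length : Int) = maxLen then pvScanBreak maxLen rest (ans + 1) else ans

def countLargestGroup (n : Int) : Int :=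
  let tempDict := (PySem.List.pyRange 1 (n + 1) 1).foldl
      (fun d i => d.modify (pvDigitSum i) [] (· ++ [i])) PySem.Dict.empty
  let bag := tempDict.values
  let bagSorted := PySem.List.sorted bag (fun x => (x.length : Int)) true
  -- bag[0] raises IndexError when the bag is empty (nonpositive n): excluded by Pre_
  let maxLen : Int := (((PySem.List.pyGet? bagSorted 0).getD []).length : Int)
  pvScanBreak maxLen bagSorted 0

-- ===== PORT B =====
def countLargestGroup_alt (n : Int) : Int :=
  let counts := (PySem.List.pyRange 1 (n + 1) 1).foldl
      (fun d i => let s := pvDigitSum i; d.insert s (d.getD s 0 + 1)) PySem.Dict.empty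
  let vs := counts.values
  -- max(counts.values()) raises ValueError when empty (nonpositive n): excluded by Pre_
  let m : Int := (PySem.List.max? vs (fun v => v)).getD 0
  vs.foldl (fun a v => if v = m then a + 1 else a) 0

-- ===== PRECONDITION & SPEC =====
-- For nonpositive n both programs raise (A: IndexError at bag[0]; B: ValueError at max() of an empty sequence).
def Pre_countLargestGroup (n : Int) : Prop := 1 ≤ n
instance (n : Int) : Decidable (Pre_countLargestGroup n) := by unfold Pre_countLargestGroup; infer_instance
def pvWitness_countLargestGroup : Int := 13

def Spec_countLargestGroup (n : Int) (out : Int) : Prop := out = countLargestGroup_alt n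
instance (n : Int) (out : Int) : Decidable (Spec_countLargestGroup n out) := by unfold Spec_countLargestGroup; infer_instance

-- ===== CLAIM (what is proved, stated in full; the proofs are below) =====
def Claim_equal_countLargestGroup : Prop := ∀ (n : Int), Dom_countLargestGroup n → Pre_countLargestGroup n → Spec_countLargestGroup n (countLargestGroup n)

-- ===== LEMMAS AND PROOFS =====

-- A's grouping dict, reshaped: the group stored at key k collects exactly the i with digit sum k.
theorem pvA_dict_getD (R : List Int) (k : Int) :
    ((R.foldl (fun d i => d.modify (pvDigitSum i) [] (· ++ [i])) PySem.Dict.empty).getD k [])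
      = ((R.map (fun i => (pvDigitSum i, i))).filter (fun p => p.1 == k)).map (·.2) := by
  rw [show (R.foldl (fun d i => d.modify (pvDigitSum i) [] (· ++ [i])) PySem.Dict.empty)
      = ((R.map (fun i => (pvDigitSum i, i))).foldl
          (fun (d : PySem.Dict Int (List Int)) p => d.modify p.1 [] (· ++ [p.2]))
          PySem.Dict.empty) from by rw [List.foldl_map],
    PySem.Dict.getD_foldl_modify_append]
  simp

theorem pvA_dict_keys (R : List Int) :
    (R.foldl (fun d i => d.modify (pvDigitSum i) [] (· ++ [i])) PySem.Dict.empty).keys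
      = PySem.Set.ofList (R.map pvDigitSum) := by
  rw [PySem.Dict.keys_foldl_modify_key]
  simp [PySem.Set.update_nil_left, PySem.Dict.keys_empty]

-- B's counting dict IS Counter(map(digit_sum, R)).
theorem pvB_dict_eq (R : List Int) :
    (R.foldl (fun d i => let s := pvDigitSum i; d.insert s (d.getD s 0 + 1)) PySem.Dict.empty)
      = PySem.Dict.counter (R.map pvDigitSum) := by
  rw [← PySem.Dict.foldl_insert_getD_add_one_eq_counter, List.foldl_map]

-- length of a group = multiplicity of its key
theorem pvGroup_len (R : List Int) (k : Int) :
    ((((R.map (fun i => (pvDigitSum i, i))).filter (fun p => p.1 == k)).map (·.2)).length : Int)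
      = ((R.map pvDigitSum).count k : Int) := by
  simp only [List.length_map, List.count_eq_countP, ← List.countP_eq_length_filter, List.countP_map]
  rfl

-- the break-scan on a length-descending list, from a bound m on all lengths, counts the entries of length m
theorem pvScanBreak_eq_countP (m : Int) (l : List (List Int)) (acc : Int)
    (hd : l.Pairwise (fun a b => (b.length : Int) ≤ (a.length : Int)))
    (hm : ∀ y ∈ l, (y.length : Int) ≤ m) :
    pvScanBreak m l acc = acc + (l.countP (fun y => (y.length : Int) == m) : Int) := by
  induction l generalizing acc with
  | nil => simp [pvScanBreak]
  | cons h t ih =>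
    rw [List.pairwise_cons] at hd
    by_cases hh : (h.length : Int) = m
    · simp only [pvScanBreak, if_pos hh]
      rw [ih (acc + 1) hd.2 (fun y hy => hm y (List.mem_cons_of_mem _ hy))]
      simp [hh]
      omega
    · have hlt : (h.length : Int) < m := lt_of_le_of_ne (hm h (List.mem_cons_self)) hh
      have hz : t.countP (fun y => (y.length : Int) == m) = 0 := by
        rw [List.countP_eq_zero]
        intro y hy
        have := hd.1 y hy
        simp only [beq_iff_eq]
        omega
      simp [pvScanBreak, hh, hz]

-- ===== VERDICT (by name: the statement is the Claim_ definition above) =====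
theorem countLargestGroup_spec : Claim_equal_countLargestGroup := by
  intro n _ hpre
  have hn : (1 : Int) ≤ n := hpre
  unfold Spec_countLargestGroup countLargestGroup countLargestGroup_alt
  simp only [pvB_dict_eq]
  set R := PySem.List.pyRange 1 (n + 1) 1 with hRdef
  set Rf := R.map pvDigitSum with hRf
  set dA := R.foldl (fun d i => d.modify (pvDigitSum i) [] (· ++ [i])) PySem.Dict.empty with hdA
  -- B's values list
  have hvB : (PySem.Dict.counter Rf).values
      = (PySem.Set.ofList Rf).map (fun k => (Rf.count k : Int)) := by
    simp [PySem.Dict.values, PySem.Dict.items_counter, List.map_map]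
  -- A's values list, mapped through length, is B's values list
  have hnodupA : dA.keys.Nodup := by
    rw [hdA]
    exact PySem.Dict.nodup_keys_foldl_modify_key R pvDigitSum [] (fun d i => (· ++ [i])) _
      PySem.Dict.nodup_keys_empty
  have hvA : dA.values = dA.keys.map (fun k => dA.getD k []) :=
    PySem.Dict.values_eq_map_keys dA hnodupA []
  have hlen : dA.values.map (fun l => (l.length : Int))
      = (PySem.Dict.counter Rf).values := by
    rw [hvA, hvB, List.map_map, pvA_dict_keys]
    apply List.map_congr_left
    intro k _
    simp only [Function.comp]
    rw [hdA, pvA_dict_getD, pvGroup_len]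
  -- nonemptiness
  have h1R : (1 : Int) ∈ R := by
    rw [hRdef, PySem.List.mem_pyRange_one]
    omega
  have hRne : R ≠ [] := List.ne_nil_of_mem h1R
  have hbagne : dA.values ≠ [] := by
    intro hemp
    rw [hvA, pvA_dict_keys] at hemp
    rcases List.map_eq_nil_iff.mp hemp with h
    have hmem1 : pvDigitSum 1 ∈ PySem.Set.ofList (R.map pvDigitSum) := by
      rw [PySem.Set.mem_ofList]
      exact List.mem_map_of_mem h1R
    rw [h] at hmem1
    simp at hmem1
  have hsne : PySem.List.sorted dA.values (fun x => (x.length : Int)) true ≠ [] := by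
    rw [Ne, PySem.List.sorted_eq_nil_iff]
    exact hbagne
  obtain ⟨h, t, hcons⟩ := List.exists_cons_of_ne_nil hsne
  rw [hcons]
  -- the head of the descending sort has maximal length
  have hhead : ∀ y ∈ dA.values, (y.length : Int) ≤ (h.length : Int) :=
    PySem.List.key_head_sorted_rev_ge _ _ hcons
  have hget : ((PySem.List.pyGet? (h :: t) 0).getD []) = h := by
    simp [PySem.List.pyGet?, PySem.List.pyIdx?]
  rw [hget]
  -- A's side: the break-scan counts maximal-length groups
  have hdesc : (h :: t).Pairwise (fun a b => (b.length : Int) ≤ (a.length : Int)) := by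
    rw [← hcons]
    exact PySem.List.sorted_pairwise_rev _ _
  have hmem_sorted : ∀ y, y ∈ (h :: t) ↔ y ∈ dA.values := by
    intro y
    rw [← hcons]
    exact PySem.List.mem_sorted _ _ _ _
  rw [pvScanBreak_eq_countP _ _ _ hdesc (fun y hy => hhead y ((hmem_sorted y).mp hy))]
  -- B's side: the fold is a countP
  rw [PySem.List.foldl_ite_add_one]
  -- identify B's max with the head length
  have hperm : (h :: t).Perm dA.values := by
    rw [← hcons]; exact PySem.List.sorted_perm _ _ _
  have hmax : (PySem.List.max? ((PySem.Dict.counter Rf).values) (fun v => v)).getD 0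
      = (h.length : Int) := by
    rw [← hlen]
    have hne : dA.values.map (fun l => (l.length : Int)) ≠ [] := by
      simpa using hbagne
    obtain ⟨m₀, hm₀⟩ : ∃ m₀, PySem.List.max? (dA.values.map (fun l => (l.length : Int))) (fun v => v) = some m₀ := by
      cases hmx : PySem.List.max? (dA.values.map (fun l => (l.length : Int))) (fun v => v) with
      | none => exact absurd ((PySem.List.max?_eq_none_iff _ _).mp hmx) hne
      | some m₀ => exact ⟨m₀, rfl⟩
    rw [hm₀]
    simp only [Option.getD_some]
    have hmem := PySem.List.max?_mem hm₀
    obtain ⟨y, hy, hym⟩ := List.mem_map.mp hmem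
    have hle1 : m₀ ≤ (h.length : Int) := by rw [← hym]; exact hhead y hy
    have hle2 : (h.length : Int) ≤ m₀ := by
      have hhmem : (h.length : Int) ∈ dA.values.map (fun l => (l.length : Int)) :=
        List.mem_map_of_mem ((hmem_sorted h).mp (List.mem_cons_self))
      exact PySem.List.max?_isMax hm₀ _ hhmem
    omega
  rw [hmax, ← hlen]
  -- both sides are the same countP
  rw [List.countP_map, hperm.countP_eq,
    show ((fun x => decide (x = ((h.length : Nat) : Int))) ∘ fun (l : List Int) => ((l.length : Nat) : Int))
        = (fun (y : List Int) => ((y.length : Nat) : Int) == ((h.length : Nat) : Int)) from by funext y; rfl]
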